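-- pv_equiv track=rewrite | github.com/Nikhil-Wagh/Alexa-WhatsTrending | lambda_function.py | getOSandCC
-- ===== SOURCE A (Python) =====
-- def getOSandCC(lines, length, extraRequired = False, trending = False):
-- 	outputSpeech = ""
-- 	cardContent = ""
-- 	extra = ""
-- 	e = 1 if extraRequired else 0 # e = int(extraRequired)
-- 	i = 0
-- 	for line in lines:
-- 		if i < length:
-- 			outputSpeech += line.capitalize()
-- 			cardContent += line.capitalize()
-- 			if i < length - 2:
-- 				outputSpeech += ", "
-- 				if trending == True:
-- 					outputSpeech += " <break time='0.3s'/> "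
-- 				cardContent += ",\n"
-- 			elif i == length - 2:
-- 				outputSpeech += ", and "
-- 				if trending == True:
-- 					outputSpeech += " <break time='0.3s'/> "
-- 				cardContent += ", and\n"
-- 			else:
-- 				outputSpeech += "."
-- 				if extraRequired == False:
-- 					break
-- 		else:
-- 			extra += line
-- 			break
-- 		i += 1
--
-- 	if extraRequired :
-- 		return outputSpeech, cardContent, extra
-- 	else:
-- 		return outputSpeech, cardContent
-- ===== SOURCE B (Python) =====
-- def getOSandCC(lines, length, extraRequired = False, trending = False):
-- 	tag = " <break time='0.3s'/> " if trending else ""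
-- 	n = max(0, min(length, len(lines)))
-- 	cap = [line.capitalize() for line in lines[:n]]
-- 	def sepSpeech(j):
-- 		if j < length - 2:
-- 			return ", " + tag
-- 		if j == length - 2:
-- 			return ", and " + tag
-- 		return "."
-- 	def sepCard(j):
-- 		if j < length - 2:
-- 			return ",\n"
-- 		if j == length - 2:
-- 			return ", and\n"
-- 		return ""
-- 	outputSpeech = "".join(c + sepSpeech(j) for j, c in enumerate(cap))
-- 	cardContent = "".join(c + sepCard(j) for j, c in enumerate(cap))
-- 	if extraRequired:
-- 		m = max(length, 0)
-- 		extra = lines[m] if m < len(lines) else ""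
-- 		return outputSpeech, cardContent, extra
-- 	return outputSpeech, cardContent
-- ===== Notes on version B (the rewrite author's own statement) =====
-- stated objective: simpler
-- what changed: A's single stateful loop with an index counter, two growing accumulators and early breaks is replaced by a closed-form decomposition: capitalize the prefix lines[:min(length,len(lines))], join them with index-determined separators, and read extra directly as lines[max(length,0)] when it exists.
import Mathlib
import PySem

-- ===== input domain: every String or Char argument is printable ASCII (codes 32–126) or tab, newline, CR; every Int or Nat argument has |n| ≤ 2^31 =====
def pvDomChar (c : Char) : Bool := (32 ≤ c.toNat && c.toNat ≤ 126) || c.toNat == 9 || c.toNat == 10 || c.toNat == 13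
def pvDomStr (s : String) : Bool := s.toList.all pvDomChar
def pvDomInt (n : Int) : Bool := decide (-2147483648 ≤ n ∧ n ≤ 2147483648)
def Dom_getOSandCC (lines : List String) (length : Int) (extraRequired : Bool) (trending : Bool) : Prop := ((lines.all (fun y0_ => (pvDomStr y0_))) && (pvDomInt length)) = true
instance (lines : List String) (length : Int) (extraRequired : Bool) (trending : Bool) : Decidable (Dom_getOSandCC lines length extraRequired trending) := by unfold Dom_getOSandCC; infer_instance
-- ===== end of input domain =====

-- B replaces A's stateful counter loop with early breaks by a closed-form decomposition (capitalized
-- prefix, index-determined separators joined, extra read by direct indexing); same cost, simpler.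

-- ===== PORT A =====

-- str.capitalize(): first char uppercased, the rest lowercased (exact on the ASCII domain)
def pyCap (s : String) : String :=
  match s.toList with
  | [] => ""
  | c :: cs => String.ofList (PySem.Chars.upperChar c :: cs.map PySem.Chars.lowerChar)

-- A's loop, step for step: state (outputSpeech, cardContent, extra, i); break = returning the state.
def goA (length : Int) (extraRequired trending : Bool) :
    List String → String → String → String → Int → String × String × String
  | [], os, cc, ex, _ => (os, cc, ex)
  | line :: rest, os, cc, ex, i =>
    if i < length then
      let os := os ++ pyCap line
      let cc := cc ++ pyCap line
      if i < length - 2 then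
        let os := os ++ ", "
        let os := if trending then os ++ " <break time='0.3s'/> " else os
        goA length extraRequired trending rest os (cc ++ ",\n") ex (i + 1)
      else if i = length - 2 then
        let os := os ++ ", and "
        let os := if trending then os ++ " <break time='0.3s'/> " else os
        goA length extraRequired trending rest os (cc ++ ", and\n") ex (i + 1)
      else
        let os := os ++ "."
        if extraRequired then goA length extraRequired trending rest os cc ex (i + 1)
        else (os, cc, ex)
    else (os, cc, ex ++ line)

-- When extraRequired = false the Python returns only the pair (outputSpeech, cardContent); the port
-- pads the declared triple with the loop's extra variable (such inputs lie outside Pre_).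
def getOSandCC (lines : List String) (length : Int) (extraRequired : Bool) (trending : Bool) : String × String × String :=
  goA length extraRequired trending lines "" "" "" 0

-- ===== PORT B =====

def sepSpeechB (length : Int) (tag : String) (j : Int) : String :=
  if j < length - 2 then ", " ++ tag
  else if j = length - 2 then ", and " ++ tag
  else "."

def sepCardB (length : Int) (j : Int) : String :=
  if j < length - 2 then ",\n"
  else if j = length - 2 then ", and\n"
  else ""

-- Source B returns the pair when extraRequired = false; the port pads the triple with "" (outside Pre_).
def getOSandCC_alt (lines : List String) (length : Int) (extraRequired : Bool) (trending : Bool) : String × String × String :=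
  let tag := if trending then " <break time='0.3s'/> " else ""
  let n : Int := max 0 (min length (lines.length : Int))
  let cap := (lines.take n.toNat).map pyCap
  let outputSpeech := String.join ((PySem.List.enumerate cap 0).map (fun jc => jc.2 ++ sepSpeechB length tag jc.1))
  let cardContent := String.join ((PySem.List.enumerate cap 0).map (fun jc => jc.2 ++ sepCardB length jc.1))
  if extraRequired then
    let m : Int := max length 0
    let extra := if m < (lines.length : Int) then (PySem.List.pyGet? lines m).getD "" else ""
    (outputSpeech, cardContent, extra)
  else (outputSpeech, cardContent, "")

-- ===== PRECONDITION & SPEC =====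
-- Pre_ excludes extraRequired = false: there the Python A returns a 2-tuple, not a value of the
-- declared triple type String × String × String, so no triple-valued claim can cover it.
def Pre_getOSandCC (lines : List String) (length : Int) (extraRequired : Bool) (trending : Bool) : Prop :=
  extraRequired = true
instance (lines : List String) (length : Int) (extraRequired : Bool) (trending : Bool) : Decidable (Pre_getOSandCC lines length extraRequired trending) := by unfold Pre_getOSandCC; infer_instance

def pvWitness_getOSandCC : List String × Int × Bool × Bool := (["cats", "dogs", "owls"], 2, true, true)

def Spec_getOSandCC (lines : List String) (length : Int) (extraRequired : Bool) (trending : Bool) (out : String × String × String) : Prop := out = getOSandCC_alt lines length extraRequired trending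
instance (lines : List String) (length : Int) (extraRequired : Bool) (trending : Bool) (out : String × String × String) : Decidable (Spec_getOSandCC lines length extraRequired trending out) := by unfold Spec_getOSandCC; infer_instance

-- ===== CLAIM (what is proved, stated in full; the proofs are below) =====
def Claim_equal_getOSandCC : Prop := ∀ (lines : List String) (length : Int) (extraRequired : Bool) (trending : Bool), Dom_getOSandCC lines length extraRequired trending → Pre_getOSandCC lines length extraRequired trending → Spec_getOSandCC lines length extraRequired trending (getOSandCC lines length extraRequired trending)

-- ===== LEMMAS AND PROOFS =====

def specA (length : Int) (tag : String) : List String → Int → String × String × String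
  | [], _ => ("", "", "")
  | l :: r, k =>
    if k < length then
      let p := specA length tag r (k + 1)
      (pyCap l ++ sepSpeechB length tag k ++ p.1, pyCap l ++ sepCardB length k ++ p.2.1, p.2.2)
    else ("", "", l)
theorem goA_eq_specA (length : Int) (trending : Bool) (ls : List String) :
    ∀ (os cc ex : String) (k : Int),
      goA length true trending ls os cc ex k =
        (os ++ (specA length (if trending then " <break time='0.3s'/> " else "") ls k).1,
         cc ++ (specA length (if trending then " <break time='0.3s'/> " else "") ls k).2.1,
         ex ++ (specA length (if trending then " <break time='0.3s'/> " else "") ls k).2.2) := by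
  induction ls with
  | nil => intro os cc ex k; simp [goA, specA]
  | cons l r ih =>
    intro os cc ex k
    by_cases hk : k < length
    · by_cases h2 : k < length - 2
      · have : ¬ k = length - 2 := by omega
        cases trending <;>
          simp [goA, specA, sepSpeechB, sepCardB, hk, h2, this, ih, String.append_assoc]
      · by_cases h3 : k = length - 2
        · cases trending <;>
            simp [goA, specA, sepSpeechB, sepCardB, hk, h2, h3, ih, String.append_assoc]
        · cases trending <;>
            simp [goA, specA, sepSpeechB, sepCardB, hk, h2, h3, ih, String.append_assoc]
    · simp [goA, specA, hk]

theorem strFoldl_append (l : List String) : ∀ a b : String, l.foldl (· ++ ·) (a ++ b) = a ++ l.foldl (· ++ ·) b := by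
  induction l with
  | nil => intro a b; simp
  | cons x xs ih => intro a b; simp only [List.foldl_cons, String.append_assoc, ih]

theorem join_nil : String.join ([] : List String) = "" := rfl

theorem join_cons (s : String) (l : List String) : String.join (s :: l) = s ++ String.join l := by
  have h := strFoldl_append l s ""
  simp only [String.join, List.foldl_cons]
  simpa using h

theorem specA_speech (length : Int) (tag : String) (ls : List String) :
    ∀ k : Int,
      (specA length tag ls k).1 =
        String.join ((PySem.List.enumerate ((ls.take (max 0 (min (length - k) (ls.length : Int))).toNat).map pyCap) k).map
          (fun jc => jc.2 ++ sepSpeechB length tag jc.1)) := by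
  induction ls with
  | nil => intro k; simp [specA, join_nil]
  | cons l r ih =>
    intro k
    by_cases hk : k < length
    · have htake : (l :: r).take (max 0 (min (length - k) ((l :: r).length : Int))).toNat
          = l :: r.take (max 0 (min (length - (k+1)) ((r.length : Int)))).toNat := by
        have ht : (max 0 (min (length - k) ((l :: r).length : Int))).toNat
            = (max 0 (min (length - (k+1)) ((r.length : Int)))).toNat + 1 := by
          simp only [List.length_cons]; push_cast; omega
        rw [ht, List.take_succ_cons]
      rw [htake, List.map_cons, PySem.List.enumerate_cons, List.map_cons, join_cons, ← ih (k+1)]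
      simp [specA, hk, String.append_assoc]
    · have ht : (max 0 (min (length - k) ((l :: r).length : Int))).toNat = 0 := by
        simp only [List.length_cons]; push_cast; omega
      rw [ht]
      simp [specA, hk, join_nil]
theorem specA_card (length : Int) (tag : String) (ls : List String) :
    ∀ k : Int,
      (specA length tag ls k).2.1 =
        String.join ((PySem.List.enumerate ((ls.take (max 0 (min (length - k) (ls.length : Int))).toNat).map pyCap) k).map
          (fun jc => jc.2 ++ sepCardB length jc.1)) := by
  induction ls with
  | nil => intro k; simp [specA, join_nil]
  | cons l r ih =>
    intro k
    by_cases hk : k < length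
    · have htake : (l :: r).take (max 0 (min (length - k) ((l :: r).length : Int))).toNat
          = l :: r.take (max 0 (min (length - (k+1)) ((r.length : Int)))).toNat := by
        have ht : (max 0 (min (length - k) ((l :: r).length : Int))).toNat
            = (max 0 (min (length - (k+1)) ((r.length : Int)))).toNat + 1 := by
          simp only [List.length_cons]; push_cast; omega
        rw [ht, List.take_succ_cons]
      rw [htake, List.map_cons, PySem.List.enumerate_cons, List.map_cons, join_cons, ← ih (k+1)]
      simp [specA, hk, String.append_assoc]
    · have ht : (max 0 (min (length - k) ((l :: r).length : Int))).toNat = 0 := by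
        simp only [List.length_cons]; push_cast; omega
      rw [ht]
      simp [specA, hk, join_nil]

theorem specA_extra (length : Int) (tag : String) (ls : List String) :
    ∀ k : Int,
      (specA length tag ls k).2.2 =
        (if max (length - k) 0 < (ls.length : Int) then (PySem.List.pyGet? ls (max (length - k) 0)).getD "" else "") := by
  induction ls with
  | nil =>
    intro k
    have : ¬ max (length - k) 0 < (([] : List String).length : Int) := by simp
    simp [specA, this]
  | cons l r ih =>
    intro k
    by_cases hk : k < length
    · have h1 : max (length - k) 0 = (((max (length - (k+1)) 0).toNat + 1 : Nat) : Int) := by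
        push_cast; omega
      have h2 : max (length - (k+1)) 0 = (((max (length - (k+1)) 0).toNat : Nat) : Int) := by
        push_cast; omega
      have hcond : (max (length - k) 0 < ((l :: r).length : Int))
          ↔ (max (length - (k+1)) 0 < ((r.length : Int))) := by
        simp only [List.length_cons]; push_cast; omega
      simp only [specA, if_pos hk]
      rw [ih (k+1), h2, PySem.List.pyGet?_natCast, h1, PySem.List.pyGet?_natCast]
      have hcc : ((((max (length - (k+1)) 0).toNat + 1 : Nat)) : Int) < (((l :: r).length : Int))
          ↔ ((((max (length - (k+1)) 0).toNat : Nat)) : Int) < ((r.length : Int)) := by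
        simp only [List.length_cons]; push_cast; omega
      simp only [hcc, List.getElem?_cons_succ]
    · have hc : max (length - k) 0 < ((l :: r).length : Int) := by
        simp only [List.length_cons]; push_cast; omega
      have hz : max (length - k) 0 = ((0 : Nat) : Int) := by push_cast; omega
      simp [specA, hk, hc, hz, PySem.List.pyGet?_natCast]

-- ===== VERDICT (by name: the statement is the Claim_ definition above) =====
theorem getOSandCC_spec : Claim_equal_getOSandCC := by
  intro lines length extraRequired trending _ hpre
  subst hpre
  unfold Spec_getOSandCC getOSandCC getOSandCC_alt
  rw [goA_eq_specA]
  have h1 := specA_speech length (if trending then " <break time='0.3s'/> " else "") lines 0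
  have h2 := specA_card length (if trending then " <break time='0.3s'/> " else "") lines 0
  have h3 := specA_extra length (if trending then " <break time='0.3s'/> " else "") lines 0
  simp only [sub_zero] at h1 h2 h3
  simp only [h1, h2, h3]
  simp [max_comm]
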